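-- pv_equiv track=rewrite | github.com/leonardolarrad/teg | scripts/generate_members_tie_h.py | generate_arguments
-- ===== SOURCE A (Python) =====
-- def generate_arguments(n: int) -> str:
--     variables = [f'_{str(i).zfill(3)}' for i in range(1, n+1)]
--     formatted_bindings = ""
--
--     for idx, var in enumerate(variables):
--         if idx > 0 and idx % 20 == 0:
--             formatted_bindings += "\n           "
--         formatted_bindings += var
--
--         if idx < len(variables) - 1:
--             formatted_bindings += ", "
--
--     return formatted_bindings
-- ===== SOURCE B (Python) =====
-- def generate_arguments(n: int) -> str:
--     variables = [f'_{str(i).zfill(3)}' for i in range(1, n + 1)]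
--     groups = [variables[i:i + 20] for i in range(0, len(variables), 20)]
--     return ', \n           '.join(', '.join(g) for g in groups)
-- ===== Notes on version B (the rewrite author's own statement) =====
-- stated objective: simpler
-- what changed: Replaces the index/modulo accumulator loop with a chunk-into-groups-of-20 comprehension followed by two str.join calls (', ' inside a group, ', \n<11 spaces>' between groups).
import Mathlib
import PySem

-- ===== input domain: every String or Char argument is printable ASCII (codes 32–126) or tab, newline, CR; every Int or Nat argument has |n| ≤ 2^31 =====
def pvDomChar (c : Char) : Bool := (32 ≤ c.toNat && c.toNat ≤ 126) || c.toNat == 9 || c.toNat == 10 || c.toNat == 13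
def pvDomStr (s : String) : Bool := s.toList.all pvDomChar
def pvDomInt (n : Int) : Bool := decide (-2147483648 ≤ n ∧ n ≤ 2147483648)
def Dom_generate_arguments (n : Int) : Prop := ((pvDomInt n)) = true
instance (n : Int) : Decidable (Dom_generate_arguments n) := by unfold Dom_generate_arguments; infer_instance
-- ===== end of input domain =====

-- B replaces A's index/modulo accumulator loop by chunking the variable list into
-- groups of 20 and joining with ', ' inside a group and ', \n<11 spaces>' between groups (objective: simpler).

-- ===== PORT A =====
def generate_arguments (n : Int) : String :=
  let vars := (PySem.List.pyRange 1 (n + 1) 1).map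
    (fun i => "_" ++ PySem.Str.zfill (PySem.Int.toStr i) 3)
  (PySem.List.enumerate vars).foldl
    (fun formatted_bindings p =>
      let fb1 := if 0 < p.1 ∧ PySem.Int.mod p.1 20 = 0
        then formatted_bindings ++ "\n           " else formatted_bindings
      let fb2 := fb1 ++ p.2
      if p.1 < PySem.List.len vars - 1 then fb2 ++ ", " else fb2)
    ""

-- ===== PORT B =====
def generate_arguments_alt (n : Int) : String :=
  let vars := (PySem.List.pyRange 1 (n + 1) 1).map
    (fun i => "_" ++ PySem.Str.zfill (PySem.Int.toStr i) 3)
  let groups := (PySem.List.pyRange 0 (PySem.List.len vars) 20).map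
    (fun i => PySem.List.slice vars (some i) (some (i + 20)))
  PySem.Str.join ", \n           " (groups.map (fun g => PySem.Str.join ", " g))

-- ===== PRECONDITION & SPEC =====
def Spec_generate_arguments (n : Int) (out : String) : Prop := out = generate_arguments_alt n
instance (n : Int) (out : String) : Decidable (Spec_generate_arguments n out) := by unfold Spec_generate_arguments; infer_instance

-- ===== CLAIM (what is proved, stated in full; the proofs are below) =====
def Claim_equal_generate_arguments : Prop := ∀ (n : Int), Dom_generate_arguments n → Spec_generate_arguments n (generate_arguments n)

-- ===== LEMMAS AND PROOFS =====

-- canonical result at the List Char level: element at position i is preceded by the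
-- wrap when 0 < i and 20 ∣ i, and followed by ", " unless it is last
def pvJ : Nat → List String → List Char
  | _, [] => []
  | i, v :: vs =>
    (if 0 < i ∧ i % 20 = 0 then "\n           ".toList else []) ++ v.toList ++
      (if vs.isEmpty then [] else ", ".toList) ++ pvJ (i + 1) vs

lemma pvA_fold (vs : List String) (L : Int) : ∀ (i : Nat) (acc : String), L = i + vs.length →
    ((PySem.List.enumerate vs (i : Int)).foldl
      (fun formatted_bindings p =>
        if p.1 < L - 1 then
          (if 0 < p.1 ∧ PySem.Int.mod p.1 20 = 0
            then formatted_bindings ++ "\n           " else formatted_bindings) ++ p.2 ++ ", "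
        else
          (if 0 < p.1 ∧ PySem.Int.mod p.1 20 = 0
            then formatted_bindings ++ "\n           " else formatted_bindings) ++ p.2) acc).toList
      = acc.toList ++ pvJ i vs := by
  induction vs with
  | nil => intro i acc _; simp [PySem.List.enumerate_nil, pvJ]
  | cons v tail ih =>
    intro i acc hL
    rw [PySem.List.enumerate_cons, List.foldl_cons]
    have h1 : ((i : Int) + 1) = ((i + 1 : Nat) : Int) := by push_cast; ring
    rw [h1, ih (i + 1) _ (by simp at hL ⊢; omega)]
    have hmod : (0 < (i : Int) ∧ PySem.Int.mod (i : Int) 20 = 0) ↔ (0 < i ∧ i % 20 = 0) := by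
      rw [PySem.Int.mod_eq_emod_of_pos (by norm_num : (0:Int) < 20)]
      constructor <;> intro h <;> constructor <;> omega
    have hL' : L = (i : Int) + (tail.length : Int) + 1 := by simp at hL; omega
    have hlast : ((i : Int) < L - 1) ↔ (tail.isEmpty = false) := by
      rcases tail with _ | ⟨w, ws⟩
      · simp at hL' ⊢; omega
      · simp at hL' ⊢; omega
    simp only [pvJ, hmod, hlast]
    by_cases h0 : 0 < i ∧ i % 20 = 0 <;> rcases tail with _ | ⟨w, ws⟩ <;>
      simp [h0, List.append_assoc]

lemma pvShift : ∀ (vs : List String) (i j : Nat), 0 < i → 0 < j → i % 20 = j % 20 →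
    pvJ i vs = pvJ j vs := by
  intro vs
  induction vs with
  | nil => intro i j _ _ _; rfl
  | cons v tail ih =>
    intro i j hi hj hm
    simp only [pvJ]
    rw [ih (i + 1) (j + 1) (by omega) (by omega) (by omega)]
    have h2 : (0 < i ∧ i % 20 = 0) ↔ (0 < j ∧ j % 20 = 0) := by omega
    simp only [h2]

lemma pvJ20 (vs : List String) (h : vs ≠ []) :
    pvJ 20 vs = "\n           ".toList ++ pvJ 0 vs := by
  rcases vs with _ | ⟨v, tail⟩
  · exact absurd rfl h
  · simp only [pvJ]
    rcases tail with _ | ⟨w, ws⟩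
    · simp [pvJ]
    · rw [pvShift (w :: ws) 21 1 (by omega) (by omega) (by omega)]
      simp

lemma pvJsmall : ∀ (vs : List String) (i : Nat), i < 20 → i + vs.length ≤ 20 →
    pvJ i vs = PySem.Chars.join ", ".toList (vs.map String.toList) := by
  intro vs
  induction vs with
  | nil => intro i _ _; simp [pvJ, PySem.Chars.join_nil]
  | cons v tail ih =>
    intro i hi hlen
    have h0 : ¬ (0 < i ∧ i % 20 = 0) := by omega
    rcases tail with _ | ⟨w, ws⟩
    · simp [pvJ, h0, PySem.Chars.join_singleton]
    · have hrec : pvJ (i + 1) (w :: ws)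
          = PySem.Chars.join ", ".toList ((w :: ws).map String.toList) :=
        ih (i + 1) (by simp at hlen; omega) (by simp at hlen ⊢; omega)
      rw [pvJ, hrec]
      simp [h0, PySem.Chars.join_cons_cons]

lemma pvJappend : ∀ (c : List String) (rest : List String) (i : Nat), c ≠ [] → rest ≠ [] →
    pvJ i (c ++ rest) = pvJ i c ++ ", ".toList ++ pvJ (i + c.length) rest := by
  intro c
  induction c with
  | nil => intro rest i h _; exact absurd rfl h
  | cons v c' ih =>
    intro rest i _ hr
    rcases c' with _ | ⟨w, ws⟩
    · rcases rest with _ | ⟨u, us⟩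
      · exact absurd rfl hr
      · simp [pvJ, List.append_assoc]
    · have hrec := ih rest (i + 1) (by simp) hr
      have hne : ((w :: ws) ++ rest).isEmpty = false := by simp
      have hidx : i + 1 + (w :: ws).length = i + (v :: w :: ws).length := by simp; omega
      rw [hidx] at hrec
      rw [List.cons_append, pvJ, hrec]
      conv_rhs => rw [pvJ]
      simp [List.append_assoc]

-- the B-side expression at the List Char level
def pvB (vs : List String) : List Char :=
  PySem.Chars.join ", \n           ".toList
    (((PySem.List.pyRange 0 (vs.length : Int) 20).map
        (fun i => PySem.List.slice vs (some i) (some (i + 20)))).map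
      (fun g => PySem.Chars.join ", ".toList (g.map String.toList)))

lemma pvRange20_nil (L : Int) (h : L ≤ 0) : PySem.List.pyRange 0 L 20 = [] := by
  rw [PySem.List.pyRange_of_pos _ _ (by norm_num)]
  simp [show ¬ ((0:Int) < L) by omega]

lemma pvRange20_cons (L : Int) (h : 0 < L) :
    PySem.List.pyRange 0 L 20 = 0 :: (PySem.List.pyRange 0 (L - 20) 20).map (· + 20) := by
  rw [PySem.List.pyRange_of_pos _ _ (by norm_num), PySem.List.pyRange_of_pos _ _ (by norm_num)]
  simp only [if_pos h]
  by_cases h20 : (0:Int) < L - 20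
  · rw [if_pos h20]
    have hm : ((L - 0 + 20 - 1) / 20).toNat = ((L - 20 - 0 + 20 - 1) / 20).toNat + 1 := by omega
    rw [hm, List.range_succ_eq_map]
    simp only [List.map_cons, List.map_map, Nat.cast_zero, mul_zero, zero_add]
    refine List.cons_eq_cons.mpr ⟨by norm_num, ?_⟩
    apply List.map_congr_left
    intro k _
    simp only [Function.comp, Nat.succ_eq_add_one]
    push_cast
    ring
  · rw [if_neg h20]
    have hm : ((L - 0 + 20 - 1) / 20).toNat = 1 := by omega
    rw [hm]
    simp [List.range_succ]

lemma pvB_eq_aux : ∀ (N : Nat) (vs : List String), vs.length ≤ N → pvB vs = pvJ 0 vs := by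
  intro N
  induction N with
  | zero =>
    intro vs h
    have hnil : vs = [] := by rcases vs with _ | _ <;> simp_all
    subst hnil
    simp [pvB, pvRange20_nil 0 (by omega), PySem.Chars.join_nil, pvJ]
  | succ N ih =>
    intro vs hlen
    by_cases hnil : vs = []
    · subst hnil
      simp [pvB, pvRange20_nil 0 (by omega), PySem.Chars.join_nil, pvJ]
    · have hposlen : 0 < vs.length := List.length_pos_iff.mpr hnil
      by_cases hsmall : vs.length ≤ 20
      · have hpos : (0:Int) < (vs.length : Int) := by omega
        unfold pvB
        rw [pvRange20_cons _ hpos, pvRange20_nil _ (by omega)]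
        simp only [List.map_nil, List.map_cons]
        rw [PySem.Chars.join_singleton]
        rw [show ((0:Int) + 20) = (20:Int) by norm_num,
          PySem.List.slice_toNat vs (by norm_num) (by norm_num),
          show ((20:Int).toNat - (0:Int).toNat) = 20 from rfl,
          show ((0:Int).toNat) = 0 from rfl, List.drop_zero,
          List.take_of_length_le (by omega)]
        rw [pvJsmall vs 0 (by omega) (by omega)]
      · -- more than 20 vars: split off the first chunk
        rw [not_le] at hsmall
        set c := vs.take 20 with hc
        set r := vs.drop 20 with hr
        have hcr : vs = c ++ r := (List.take_append_drop 20 vs).symm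
        have hclen : c.length = 20 := by simp [hc]; omega
        have hrlen : r.length = vs.length - 20 := by simp [hr]
        have hrne : r ≠ [] := by
          intro h0; rw [h0] at hrlen; simp at hrlen; omega
        have hcne : c ≠ [] := by
          intro h0; rw [h0] at hclen; simp at hclen
        have hrpos : (0:Int) < (r.length : Int) := by
          have := List.length_pos_iff.mpr hrne; omega
        -- left side: chunk decomposition of pvB
        unfold pvB
        rw [pvRange20_cons _ (by omega)]
        simp only [List.map_cons, List.map_map]
        have hslice0 : PySem.List.slice vs (some 0) (some (0 + 20)) = c := by
          rw [show ((0:Int) + 20) = (20:Int) by norm_num,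
            PySem.List.slice_toNat vs (by norm_num) (by norm_num),
            show ((20:Int).toNat - (0:Int).toNat) = 20 from rfl,
            show ((0:Int).toNat) = 0 from rfl, List.drop_zero]
        have hmapsh :
            (PySem.List.pyRange 0 ((vs.length : Int) - 20) 20).map
                ((fun g => PySem.Chars.join ", ".toList (g.map String.toList)) ∘
                  ((fun i => PySem.List.slice vs (some i) (some (i + 20))) ∘ (· + 20)))
              = (PySem.List.pyRange 0 ((r.length : Int)) 20).map
                ((fun g => PySem.Chars.join ", ".toList (g.map String.toList)) ∘
                  (fun i => PySem.List.slice r (some i) (some (i + 20)))) := by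
          have hb : ((vs.length : Int) - 20) = (r.length : Int) := by omega
          rw [hb]
          apply List.map_congr_left
          intro i hi
          have h0i : 0 ≤ i := ((PySem.List.mem_pyRange_iff_of_pos (by norm_num) i).mp hi).1
          simp only [Function.comp]
          congr 1
          rw [PySem.List.slice_toNat vs (by omega) (by omega),
            PySem.List.slice_toNat r (by omega) (by omega), hr, List.drop_drop,
            show (i + 20 + 20).toNat - (i + 20).toNat = (i + 20).toNat - i.toNat from by omega,
            show (i + 20).toNat = 20 + i.toNat from by omega]
        rw [hmapsh]
        have hrest :
            (PySem.List.pyRange 0 ((r.length : Int)) 20).map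
                ((fun g => PySem.Chars.join ", ".toList (g.map String.toList)) ∘
                  (fun i => PySem.List.slice r (some i) (some (i + 20)))) ≠ [] := by
          rw [pvRange20_cons _ hrpos]
          simp
        rcases hgl : (PySem.List.pyRange 0 ((r.length : Int)) 20).map
            ((fun g => PySem.Chars.join ", ".toList (g.map String.toList)) ∘
              (fun i => PySem.List.slice r (some i) (some (i + 20)))) with _ | ⟨g0, gs⟩
        · exact absurd hgl hrest
        · rw [PySem.Chars.join_cons_cons]
          have hBr : pvB r = pvJ 0 r := ih r (by rw [hrlen]; omega)
          unfold pvB at hBr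
          rw [List.map_map, hgl] at hBr
          rw [hslice0, hBr]
          -- right side
          conv_rhs => rw [hcr]
          rw [pvJappend c r 0 hcne hrne, hclen, pvJ20 r hrne,
            pvJsmall c 0 (by omega) (by omega)]
          simp [List.append_assoc]

lemma pvB_eq (vs : List String) : pvB vs = pvJ 0 vs := pvB_eq_aux vs.length vs le_rfl

-- ===== VERDICT (by name: the statement is the Claim_ definition above) =====
theorem generate_arguments_spec : Claim_equal_generate_arguments := by
  intro n _
  unfold Spec_generate_arguments generate_arguments generate_arguments_alt
  rw [← String.toList_inj]
  simp only [PySem.List.len_eq]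
  generalize (PySem.List.pyRange 1 (n + 1) 1).map
      (fun i => "_" ++ PySem.Str.zfill (PySem.Int.toStr i) 3) = vs
  have hA := pvA_fold vs ((vs.length : Int)) 0 "" (by simp)
  have h0 : PySem.List.enumerate vs (0 : Int) = PySem.List.enumerate vs (((0 : Nat) : Int)) := by
    norm_num
  rw [h0]
  refine hA.trans (Eq.symm ?_)
  rw [PySem.Str.toList_join, List.map_map]
  have hmap : (List.map (String.toList ∘ fun g => PySem.Str.join ", " g)
        ((PySem.List.pyRange 0 (vs.length : Int) 20).map
          (fun i => PySem.List.slice vs (some i) (some (i + 20)))))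
      = (((PySem.List.pyRange 0 ((vs.length : Int)) 20).map
          (fun i => PySem.List.slice vs (some i) (some (i + 20)))).map
        (fun g => PySem.Chars.join ", ".toList (g.map String.toList))) := by
    simp only [List.map_map]
    apply List.map_congr_left
    intro g _
    simp [Function.comp, PySem.Str.toList_join]
  rw [hmap]
  have hB := pvB_eq vs
  unfold pvB at hB
  rw [hB]
  simp
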